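-- pv_equiv track=rewrite | github.com/pwnfo/fuse | fuse/utils/generator.py | _find_closing
-- ===== SOURCE A (Python) =====
-- def _find_closing(s: str, start: int, closer: str) -> int:
--     i = start
--     n = len(s)
--     while i < n:
--         ch = s[i]
--         if ch == "\\":
--             i += 2
--             continue
--         if ch == closer:
--             return i
--         i += 1
--     return -1
-- ===== SOURCE B (Python) =====
-- def _find_closing(s: str, start: int, closer: str) -> int:
--     # Characterization-based rewrite: pass 1 tabulates, for each position, the
--     # length of the backslash run immediately preceding it (within the window);
--     # pass 2 returns the first position holding an unescaped closer (even run).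
--     n = len(s)
--     idxs = range(start, n)
--     runs = []
--     run = 0
--     for k in idxs:
--         runs.append(run)
--         run = run + 1 if s[k] == "\\" else 0
--     for k, r in zip(idxs, runs):
--         if r % 2 == 0 and s[k] != "\\" and s[k] == closer:
--             return k
--     return -1
-- ===== Notes on version B (the rewrite author's own statement) =====
-- stated objective: alternative
-- what changed: Replaces A's sequential skip-by-two scanner with a two-stage characterization: a first pass tabulates the length of the backslash run preceding each position, then a second pass returns the first position holding a non-backslash closer whose preceding run is even (i.e. unescaped).
import Mathlib
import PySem

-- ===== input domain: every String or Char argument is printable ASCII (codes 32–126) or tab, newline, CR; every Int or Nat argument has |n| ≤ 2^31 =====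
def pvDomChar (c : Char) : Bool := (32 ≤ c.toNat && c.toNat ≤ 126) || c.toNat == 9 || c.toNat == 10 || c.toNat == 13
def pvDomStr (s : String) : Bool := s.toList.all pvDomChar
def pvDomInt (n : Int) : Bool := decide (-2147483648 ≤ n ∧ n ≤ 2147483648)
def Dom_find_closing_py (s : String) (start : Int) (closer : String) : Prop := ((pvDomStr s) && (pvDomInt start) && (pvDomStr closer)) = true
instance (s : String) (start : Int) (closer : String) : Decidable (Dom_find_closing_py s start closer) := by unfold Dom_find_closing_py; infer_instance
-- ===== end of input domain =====

-- B recomputes A's answer from a characterization: pass 1 tabulates preceding-backslash-run lengths, pass 2 returns the first position with an unescaped (even-run, non-backslash) closer; same O(n) cost, different algorithm.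


-- ===== PORT A =====
-- while i < n: jump i by 2 on a backslash, return i on the closer, else i + 1; -1 after the loop.
-- pyGet? = none is Python's IndexError (only reachable outside Pre_); -2 is an arbitrary value there.
def findClosingLoopA (cs : List Char) (closer : String) (i : Int) : Int :=
  if _h : i < (cs.length : Int) then
    match PySem.List.pyGet? cs i with
    | none => -2
    | some ch =>
      if ch = '\\' then findClosingLoopA cs closer (i + 2)
      else if String.mk [ch] = closer then i
      else findClosingLoopA cs closer (i + 1)
  else -1
termination_by ((cs.length : Int) - i).toNat
decreasing_by all_goals omega

def find_closing_py (s : String) (start : Int) (closer : String) : Int :=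
  findClosingLoopA s.toList closer start

-- ===== PORT B =====
-- pass 1 loop body: runs.append(run); run = run + 1 if s[k] == '\\' else 0
-- (pyGet? = none is Python's IndexError in pass 1, unreachable under Pre_; state kept unchanged there)
def findClosingStepB1 (cs : List Char) (st : Int × List Int) (k : Int) : Int × List Int :=
  let runs' := st.2 ++ [st.1]
  match PySem.List.pyGet? cs k with
  | none => (st.1, runs')
  | some ch => (if ch = '\\' then st.1 + 1 else 0, runs')

-- pass 2: first k with r % 2 == 0 and s[k] != '\\' and s[k] == closer, else -1
-- (-2 is an arbitrary value at pyGet? = none, Python's IndexError, unreachable under Pre_)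
def findClosingB2 (cs : List Char) (closer : String) : List (Int × Int) → Int
  | [] => -1
  | (k, r) :: rest =>
    match PySem.List.pyGet? cs k with
    | none => -2
    | some ch =>
      if PySem.Int.mod r 2 = 0 ∧ ch ≠ '\\' ∧ String.mk [ch] = closer then k
      else findClosingB2 cs closer rest

def find_closing_py_alt (s : String) (start : Int) (closer : String) : Int :=
  findClosingB2 s.toList closer
    ((PySem.List.pyRange start (s.toList.length : Int)).zip
      (((PySem.List.pyRange start (s.toList.length : Int)).foldl
          (findClosingStepB1 s.toList) ((0 : Int), ([] : List Int))).2))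

-- ===== PRECONDITION & SPEC =====
-- Pre_ excludes exactly the inputs where Python A raises IndexError: start < -len(s)
-- (for empty s that means any negative start, where 'while i < 0' runs and s[i] raises).
def Pre_find_closing_py (s : String) (start : Int) (closer : String) : Prop :=
  -(s.toList.length : Int) ≤ start
instance (s : String) (start : Int) (closer : String) : Decidable (Pre_find_closing_py s start closer) := by
  unfold Pre_find_closing_py; infer_instance

def pvWitness_find_closing_py : String × Int × String := ("a\\))", 0, ")")

def Spec_find_closing_py (s : String) (start : Int) (closer : String) (out : Int) : Prop := out = find_closing_py_alt s start closer
instance (s : String) (start : Int) (closer : String) (out : Int) : Decidable (Spec_find_closing_py s start closer out) := by unfold Spec_find_closing_py; infer_instance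

-- ===== CLAIM (what is proved, stated in full; the proofs are below) =====
def Claim_equal_find_closing_py : Prop := ∀ (s : String) (start : Int) (closer : String), Dom_find_closing_py s start closer → Pre_find_closing_py s start closer → Spec_find_closing_py s start closer (find_closing_py s start closer)

-- ===== LEMMAS AND PROOFS =====

-- the run table B's pass 1 builds, as a direct recursion (proof helper)
def runsRec (cs : List Char) (i r : Int) : List Int :=
  if _h : i < (cs.length : Int) then
    r :: runsRec cs (i + 1)
      (match PySem.List.pyGet? cs i with
       | none => r
       | some ch => if ch = '\\' then r + 1 else 0)
  else []
termination_by ((cs.length : Int) - i).toNat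
decreasing_by omega

-- B's two passes fused into one recursion (proof helper)
def fusedB (cs : List Char) (closer : String) (i r : Int) : Int :=
  if _h : i < (cs.length : Int) then
    match PySem.List.pyGet? cs i with
    | none => -2
    | some ch =>
      if PySem.Int.mod r 2 = 0 ∧ ch ≠ '\\' ∧ String.mk [ch] = closer then i
      else fusedB cs closer (i + 1) (if ch = '\\' then r + 1 else 0)
  else -1
termination_by ((cs.length : Int) - i).toNat
decreasing_by omega

lemma pyGet?_some_of_inrange (cs : List Char) (i : Int)
    (h1 : -(cs.length : Int) ≤ i) (h2 : i < (cs.length : Int)) :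
    ∃ ch, PySem.List.pyGet? cs i = some ch := by
  cases hg : PySem.List.pyGet? cs i with
  | none =>
    have := (PySem.List.pyGet?_eq_none_iff cs i).mp hg
    simp [PySem.Raise.InRange] at this
    omega
  | some ch => exact ⟨ch, rfl⟩

-- pass 1's foldl builds exactly runsRec (the accumulator is generalized)
lemma foldl_stepB1_eq (cs : List Char) :
    ∀ k i r acc, (((cs.length : Int) - i).toNat ≤ k) →
      ((PySem.List.pyRange i (cs.length : Int)).foldl (findClosingStepB1 cs) (r, acc)).2
        = acc ++ runsRec cs i r := by
  intro k
  induction k with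
  | zero =>
    intro i r acc hk
    rw [PySem.List.pyRange_one_eq_nil (by omega), runsRec, dif_neg (by omega)]
    simp
  | succ k ih =>
    intro i r acc hk
    by_cases hlt : i < (cs.length : Int)
    · rw [PySem.List.pyRange_one_cons hlt, List.foldl_cons, runsRec, dif_pos hlt]
      cases hg : PySem.List.pyGet? cs i with
      | none =>
        simp only [findClosingStepB1, hg]
        rw [ih (i + 1) r (acc ++ [r]) (by omega)]
        simp
      | some ch =>
        simp only [findClosingStepB1, hg]
        rw [ih (i + 1) _ (acc ++ [r]) (by omega)]
        simp
    · rw [PySem.List.pyRange_one_eq_nil (by omega), runsRec, dif_neg hlt]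
      simp

-- pass 2 over the zipped table is the fused recursion
lemma findB2_zip_eq (cs : List Char) (closer : String) :
    ∀ k i r, (((cs.length : Int) - i).toNat ≤ k) →
      findClosingB2 cs closer ((PySem.List.pyRange i (cs.length : Int)).zip (runsRec cs i r))
        = fusedB cs closer i r := by
  intro k
  induction k with
  | zero =>
    intro i r hk
    rw [PySem.List.pyRange_one_eq_nil (by omega), fusedB, dif_neg (by omega)]
    rfl
  | succ k ih =>
    intro i r hk
    by_cases hlt : i < (cs.length : Int)
    · rw [PySem.List.pyRange_one_cons hlt, runsRec, dif_pos hlt, fusedB, dif_pos hlt]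
      cases hg : PySem.List.pyGet? cs i with
      | none => simp only [List.zip_cons_cons, findClosingB2, hg]
      | some ch =>
        simp only [List.zip_cons_cons, findClosingB2, hg]
        by_cases hc : PySem.Int.mod r 2 = 0 ∧ ch ≠ '\\' ∧ String.mk [ch] = closer
        · rw [if_pos hc, if_pos hc]
        · rw [if_neg hc, if_neg hc]
          exact ih (i + 1) _ (by omega)
    · rw [PySem.List.pyRange_one_eq_nil (by omega), runsRec, dif_neg hlt, fusedB, dif_neg hlt]
      rfl

-- A's skip-by-two loop equals the fused recursion whenever the carried run length is even
lemma loopA_eq_fusedB (cs : List Char) (closer : String) :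
    ∀ k i r, (((cs.length : Int) - i).toNat ≤ k) → -(cs.length : Int) ≤ i →
      PySem.Int.mod r 2 = 0 →
      findClosingLoopA cs closer i = fusedB cs closer i r := by
  intro k
  induction k with
  | zero =>
    intro i r hk _ _
    rw [findClosingLoopA, dif_neg (by omega), fusedB, dif_neg (by omega)]
  | succ k ih =>
    intro i r hk hlo hr
    by_cases hlt : i < (cs.length : Int)
    · obtain ⟨ch, hg⟩ := pyGet?_some_of_inrange cs i hlo hlt
      rw [findClosingLoopA, dif_pos hlt, fusedB, dif_pos hlt, hg]
      dsimp only
      have hr' := PySem.Int.mod_eq_emod_of_pos (a := r) (b := 2) (by omega)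
      by_cases hbs : ch = '\\'
      · -- A jumps to i + 2; B walks through i + 1 with an odd run
        rw [if_pos hbs, if_neg (by simp [hbs])]
        rw [if_pos hbs]
        by_cases hlt2 : i + 1 < (cs.length : Int)
        · obtain ⟨ch2, hg2⟩ := pyGet?_some_of_inrange cs (i + 1) (by omega) hlt2
          rw [fusedB, dif_pos hlt2, hg2]
          dsimp only
          have hodd : ¬ PySem.Int.mod (r + 1) 2 = 0 := by
            rw [PySem.Int.mod_eq_emod_of_pos (by omega)] at *
            omega
          rw [if_neg (fun hc => hodd hc.1)]
          have heven : PySem.Int.mod (if ch2 = '\\' then r + 1 + 1 else 0) 2 = 0 := by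
            split_ifs <;> rw [PySem.Int.mod_eq_emod_of_pos (by omega)] <;> omega
          have e2 : i + 1 + 1 = i + 2 := by ring
          rw [e2]
          exact ih (i + 2) _ (by omega) (by omega) heven
        · rw [fusedB, dif_neg hlt2, findClosingLoopA, dif_neg (by omega)]
      · rw [if_neg hbs]
        by_cases hcl : String.mk [ch] = closer
        · rw [if_pos hcl, if_pos ⟨hr, hbs, hcl⟩]
        · rw [if_neg hcl, if_neg (by simp [hcl]), if_neg hbs]
          exact ih (i + 1) 0 (by omega) (by omega) (by decide)
    · rw [findClosingLoopA, dif_neg hlt, fusedB, dif_neg hlt]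

-- ===== VERDICT (by name: the statement is the Claim_ definition above) =====
theorem find_closing_py_spec : Claim_equal_find_closing_py := by
  intro s start closer _ hpre
  unfold Spec_find_closing_py find_closing_py find_closing_py_alt
  rw [foldl_stepB1_eq s.toList (((s.toList.length : Int) - start).toNat) start 0 [] le_rfl,
      List.nil_append,
      findB2_zip_eq s.toList closer (((s.toList.length : Int) - start).toNat) start 0 le_rfl]
  exact loopA_eq_fusedB s.toList closer (((s.toList.length : Int) - start).toNat) start 0
    le_rfl hpre (by decide)
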